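-- pv_equiv track=rewrite | github.com/BlueDragon23/cocktail-ingredients | optimiser/optimiser.py | filter_useless_ingredients
-- ===== SOURCE A (Python) =====
-- from typing import Dict, List, Optional
--
-- def filter_useless_ingredients(matrix: List[List[bool]]) -> (List[List[bool]], List[int], List[int]):
--     """
--     If an ingredient appears in at most one cocktail, there's no point keeping it.
--     Remove it, and any cocktails it appears in. Return the updated matrix,
--     the list of removed columns, and the list of removed rows
--     """
--     culled_columns = []
--     culled_rows = []
--     for column in range(len(matrix[0])):
--         ingredient_usage = [cocktail[column] for cocktail in matrix]
--         true_rows = [j for j, b in enumerate(ingredient_usage) if b]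
--         if (len(true_rows) <= 1):
--             # Cull the weak
--             culled_columns.append(column)
--             for row in true_rows:
--                 culled_rows.append(row)
--     new_matrix = [[value for j, value in enumerate(row) if j not in culled_columns]
--                     for i, row in enumerate(matrix) if i not in culled_rows]
--     return (new_matrix, culled_rows, culled_columns)
-- ===== SOURCE B (Python) =====
-- from typing import Dict, List, Optional
--
-- def filter_useless_ingredients(matrix: List[List[bool]]) -> (List[List[bool]], List[int], List[int]):
--     """One row-major pass keeps per-column usage count and last using row,
--     instead of scanning one full column per iteration."""
--     num_cols = len(matrix[0])
--     count = [0] * num_cols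
--     only_row = [0] * num_cols
--     for i, row in enumerate(matrix):
--         for j in range(num_cols):
--             if row[j]:
--                 count[j] += 1
--                 only_row[j] = i
--     culled_columns = []
--     culled_rows = []
--     for j in range(num_cols):
--         if count[j] <= 1:
--             culled_columns.append(j)
--             if count[j] == 1:
--                 culled_rows.append(only_row[j])
--     new_matrix = [[v for j, v in enumerate(row) if j not in culled_columns]
--                   for i, row in enumerate(matrix) if i not in culled_rows]
--     return (new_matrix, culled_rows, culled_columns)
-- ===== Notes on version B (the rewrite author's own statement) =====
-- stated objective: alternative
-- what changed: A scans the whole matrix once per column (building each column's usage list); B makes a single row-major pass maintaining per-column count and last-using-row tables, then derives the culled columns/rows from the tables in one column sweep.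
import Mathlib
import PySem

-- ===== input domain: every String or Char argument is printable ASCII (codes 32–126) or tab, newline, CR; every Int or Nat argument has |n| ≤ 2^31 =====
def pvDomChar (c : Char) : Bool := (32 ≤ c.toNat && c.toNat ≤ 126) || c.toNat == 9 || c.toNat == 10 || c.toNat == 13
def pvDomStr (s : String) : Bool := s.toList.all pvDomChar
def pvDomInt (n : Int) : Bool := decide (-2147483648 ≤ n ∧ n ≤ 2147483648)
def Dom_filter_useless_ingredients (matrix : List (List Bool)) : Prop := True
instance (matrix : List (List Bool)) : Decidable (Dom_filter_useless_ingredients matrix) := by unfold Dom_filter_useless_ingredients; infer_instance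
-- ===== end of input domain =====

-- B replaces A's per-column scans of the whole matrix by a single row-major pass
-- maintaining a per-column usage count and last-using-row table (objective: alternative).

-- shared final comprehension (identical line in both Pythons): drop culled rows and columns
def pvRebuild (matrix : List (List Bool)) (culled_rows culled_columns : List Int) : List (List Bool) :=
  ((PySem.List.enumerate matrix 0).filter (fun p => !culled_rows.contains p.1)).map
    (fun p => ((PySem.List.enumerate p.2 0).filter (fun q => !culled_columns.contains q.1)).map (fun q => q.2))

-- ===== PORT A =====
-- body of A's `for column in range(len(matrix[0]))` loop
def pvA_col_step (matrix : List (List Bool)) (st : List Int × List Int) (column : Int) : List Int × List Int :=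
  let ingredient_usage := matrix.map (fun cocktail => (PySem.List.pyGet? cocktail column).getD false)
  let true_rows := ((PySem.List.enumerate ingredient_usage 0).filter (fun p => p.2)).map (fun p => p.1)
  if true_rows.length ≤ 1 then (st.1 ++ [column], st.2 ++ true_rows) else st

def filter_useless_ingredients (matrix : List (List Bool)) : List (List Bool) × List Int × List Int :=
  let ncols : Nat := ((PySem.List.pyGet? matrix 0).getD []).length
  let st := (PySem.List.pyRange 0 (ncols : Int) 1).foldl (pvA_col_step matrix) ([], [])
  (pvRebuild matrix st.2 st.1, st.2, st.1)

-- ===== PORT B =====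
-- B's inner `for j in range(num_cols)` loop over one row (index i)
def pvB_inner (ncols : Nat) (row : List Bool) (i : Int) (co : List Int × List Int) : List Int × List Int :=
  (List.range ncols).foldl
    (fun (co2 : List Int × List Int) (j : Nat) =>
      if (PySem.List.pyGet? row (j : Int)).getD false then
        (co2.1.set j (co2.1.getD j 0 + 1), co2.2.set j i)
      else co2) co

-- B's single row-major pass producing (count, only_row)
def pvB_pass (ncols : Nat) (matrix : List (List Bool)) : List Int × List Int :=
  (PySem.List.enumerate matrix 0).foldl
    (fun (co : List Int × List Int) (ir : Int × List Bool) => pvB_inner ncols ir.2 ir.1 co)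
    (List.replicate ncols 0, List.replicate ncols 0)

-- B's `for j in range(num_cols)` cull loop over the tables
def pvB_cull (ncols : Nat) (co : List Int × List Int) : List Int × List Int :=
  (List.range ncols).foldl
    (fun (cc : List Int × List Int) (j : Nat) =>
      if co.1.getD j 0 ≤ 1 then
        (cc.1 ++ [(j : Int)], if co.1.getD j 0 = 1 then cc.2 ++ [co.2.getD j 0] else cc.2)
      else cc) ([], [])

def filter_useless_ingredients_alt (matrix : List (List Bool)) : List (List Bool) × List Int × List Int :=
  let ncols : Nat := ((PySem.List.pyGet? matrix 0).getD []).length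
  let co := pvB_pass ncols matrix
  let cc := pvB_cull ncols co
  (pvRebuild matrix cc.2 cc.1, cc.2, cc.1)

-- ===== PRECONDITION & SPEC =====
-- Pre_ excludes exactly the inputs where Python A raises IndexError: the empty matrix
-- (matrix[0]) and matrices with a row shorter than the first row (cocktail[column]).
def Pre_filter_useless_ingredients (matrix : List (List Bool)) : Prop :=
  matrix ≠ [] ∧ ∀ row ∈ matrix, (matrix.headD []).length ≤ row.length
instance (matrix : List (List Bool)) : Decidable (Pre_filter_useless_ingredients matrix) := by
  unfold Pre_filter_useless_ingredients; infer_instance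
def pvWitness_filter_useless_ingredients : List (List Bool) :=
  [[true, true, false], [false, true, true], [false, true, true]]
def Spec_filter_useless_ingredients (matrix : List (List Bool)) (out : List (List Bool) × List Int × List Int) : Prop := out = filter_useless_ingredients_alt matrix
instance (matrix : List (List Bool)) (out : List (List Bool) × List Int × List Int) : Decidable (Spec_filter_useless_ingredients matrix out) := by unfold Spec_filter_useless_ingredients; infer_instance

-- ===== CLAIM (what is proved, stated in full; the proofs are below) =====
def Claim_equal_filter_useless_ingredients : Prop := ∀ (matrix : List (List Bool)), Dom_filter_useless_ingredients matrix → Pre_filter_useless_ingredients matrix → Spec_filter_useless_ingredients matrix (filter_useless_ingredients matrix)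

-- ===== LEMMAS AND PROOFS =====

-- the list of (Int) row indices, starting at i0, of the rows with True in column j
def truesFrom (rows : List (List Bool)) (j : Nat) (i0 : Int) : List Int :=
  match rows with
  | [] => []
  | r :: rs =>
    if (PySem.List.pyGet? r (j : Int)).getD false then i0 :: truesFrom rs j (i0 + 1)
    else truesFrom rs j (i0 + 1)

-- A's true_rows comprehension computes truesFrom
theorem true_rows_eq (rows : List (List Bool)) (j : Nat) (i0 : Int) :
    ((PySem.List.enumerate (rows.map (fun c => (PySem.List.pyGet? c (j : Int)).getD false)) i0).filter
      (fun p => p.2)).map (fun p => p.1) = truesFrom rows j i0 := by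
  induction rows generalizing i0 with
  | nil => simp [truesFrom]
  | cons r rs ih =>
    simp only [List.map_cons, PySem.List.enumerate_cons, List.filter_cons, truesFrom]
    split <;> simpa using ih (i0 + 1)

-- a truncated form of B's inner loop, for induction on the range bound
def innerGo (row : List Bool) (i : Int) (m : Nat) (co : List Int × List Int) : List Int × List Int :=
  (List.range m).foldl
    (fun (co2 : List Int × List Int) (j : Nat) =>
      if (PySem.List.pyGet? row (j : Int)).getD false then
        (co2.1.set j (co2.1.getD j 0 + 1), co2.2.set j i)
      else co2) co

-- one row updates each column of the tables at most once
theorem innerGo_char (row : List Bool) (i : Int) (N : Nat) :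
    ∀ (m : Nat), m ≤ N → ∀ (co : List Int × List Int), co.1.length = N → co.2.length = N →
      (innerGo row i m co).1.length = N ∧ (innerGo row i m co).2.length = N ∧
      ∀ j : Nat,
        (innerGo row i m co).1.getD j 0 =
          (if j < m ∧ (PySem.List.pyGet? row (j : Int)).getD false then co.1.getD j 0 + 1 else co.1.getD j 0) ∧
        (innerGo row i m co).2.getD j 0 =
          (if j < m ∧ (PySem.List.pyGet? row (j : Int)).getD false then i else co.2.getD j 0) := by
  intro m
  induction m with
  | zero => intro _ co h1 h2; simp [innerGo, h1, h2]
  | succ m ih =>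
    intro hm co h1 h2
    have hgo : innerGo row i (m + 1) co =
        (fun (co2 : List Int × List Int) (j : Nat) =>
          if (PySem.List.pyGet? row (j : Int)).getD false then
            (co2.1.set j (co2.1.getD j 0 + 1), co2.2.set j i)
          else co2) (innerGo row i m co) m := by
      simp [innerGo, List.range_succ]
    obtain ⟨l1, l2, hj⟩ := ih (Nat.le_of_succ_le hm) co h1 h2
    rw [hgo]
    by_cases hr : (PySem.List.pyGet? row (m : Int)).getD false
    · simp only [hr, if_true]
      refine ⟨by simpa using l1, by simpa using l2, ?_⟩
      intro j
      obtain ⟨hj1, hj2⟩ := hj j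
      by_cases hjm : j = m
      · subst hjm
        have hr' : row[j]?.getD false = true := by simpa using hr
        constructor
        · rw [List.getD_eq_getElem?_getD, List.getElem?_set, if_pos rfl, if_pos (by omega),
            Option.getD_some, hj1]
          simp [hr']
        · rw [List.getD_eq_getElem?_getD, List.getElem?_set, if_pos rfl, if_pos (by omega),
            Option.getD_some]
          simp [hr']
      · constructor
        · rw [List.getD_eq_getElem?_getD, List.getElem?_set, if_neg (by omega),
            ← List.getD_eq_getElem?_getD, hj1]
          have : (j < m + 1 ∧ (PySem.List.pyGet? row (j : Int)).getD false = true) ↔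
                 (j < m ∧ (PySem.List.pyGet? row (j : Int)).getD false = true) := by
            constructor <;> rintro ⟨h, hb⟩ <;> exact ⟨by omega, hb⟩
          rw [if_congr this rfl rfl]
        · rw [List.getD_eq_getElem?_getD, List.getElem?_set, if_neg (by omega),
            ← List.getD_eq_getElem?_getD, hj2]
          have : (j < m + 1 ∧ (PySem.List.pyGet? row (j : Int)).getD false = true) ↔
                 (j < m ∧ (PySem.List.pyGet? row (j : Int)).getD false = true) := by
            constructor <;> rintro ⟨h, hb⟩ <;> exact ⟨by omega, hb⟩
          rw [if_congr this rfl rfl]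
    · simp only [hr]
      refine ⟨l1, l2, ?_⟩
      intro j
      obtain ⟨hj1, hj2⟩ := hj j
      refine ⟨hj1.trans ?_, hj2.trans ?_⟩ <;>
      · by_cases hjc : j < m ∧ (PySem.List.pyGet? row (j : Int)).getD false = true
        · rw [if_pos hjc, if_pos ⟨by omega, hjc.2⟩]
        · rw [if_neg hjc, if_neg (by rintro ⟨h, hb⟩; rcases Nat.lt_succ_iff_lt_or_eq.mp h with h'|h'; exact hjc ⟨h', hb⟩; subst h'; exact absurd hb hr)]

-- a shifted form of B's pass, for induction on the rows
def passGo (N : Nat) (rows : List (List Bool)) (i0 : Int) (co : List Int × List Int) : List Int × List Int :=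
  (PySem.List.enumerate rows i0).foldl
    (fun (co : List Int × List Int) (ir : Int × List Bool) => innerGo ir.2 ir.1 N co) co

theorem pvB_pass_eq_passGo (ncols : Nat) (matrix : List (List Bool)) :
    pvB_pass ncols matrix = passGo ncols matrix 0 (List.replicate ncols 0, List.replicate ncols 0) := rfl

-- B's pass computes, per column, the number of using rows and the last using row
theorem passGo_char (N : Nat) :
    ∀ (rows : List (List Bool)) (i0 : Int) (co : List Int × List Int),
      co.1.length = N → co.2.length = N →
      (passGo N rows i0 co).1.length = N ∧ (passGo N rows i0 co).2.length = N ∧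
      ∀ j : Nat, j < N →
        (passGo N rows i0 co).1.getD j 0 = co.1.getD j 0 + ((truesFrom rows j i0).length : Int) ∧
        (passGo N rows i0 co).2.getD j 0 = ((truesFrom rows j i0).getLast?).getD (co.2.getD j 0) := by
  intro rows
  induction rows with
  | nil => intro i0 co h1 h2; simp [passGo, truesFrom, h1, h2]
  | cons r rs ih =>
    intro i0 co h1 h2
    have hstep : passGo N (r :: rs) i0 co = passGo N rs (i0 + 1) (innerGo r i0 N co) := by
      simp [passGo, PySem.List.enumerate_cons, innerGo]
    obtain ⟨l1, l2, hj⟩ := innerGo_char r i0 N N (le_refl N) co h1 h2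
    obtain ⟨l1', l2', hrec⟩ := ih (i0 + 1) (innerGo r i0 N co) l1 l2
    rw [hstep]
    refine ⟨l1', l2', ?_⟩
    intro j hjN
    obtain ⟨hc, ho⟩ := hrec j hjN
    obtain ⟨hj1, hj2⟩ := hj j
    rw [hc, ho, hj1, hj2]
    by_cases hr : (PySem.List.pyGet? r (j : Int)).getD false
    · have hr' : r[j]?.getD false = true := by simpa using hr
      rw [if_pos ⟨hjN, hr⟩, if_pos ⟨hjN, hr⟩]
      have htf : truesFrom (r :: rs) j i0 = i0 :: truesFrom rs j (i0 + 1) := by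
        simp [truesFrom, hr']
      rw [htf]
      constructor
      · push_cast [List.length_cons]; ring
      · rw [List.getLast?_cons]
        cases (truesFrom rs j (i0 + 1)).getLast? <;> simp
    · rw [if_neg (by rintro ⟨_, hb⟩; exact absurd hb hr), if_neg (by rintro ⟨_, hb⟩; exact absurd hb hr)]
      have hr' : r[j]?.getD false = false := by simpa using hr
      have htf : truesFrom (r :: rs) j i0 = truesFrom rs j (i0 + 1) := by
        simp [truesFrom, hr']
      rw [htf]
      exact ⟨rfl, rfl⟩

-- the two column loops produce the same (culled_columns, culled_rows) pair
theorem cull_eq (matrix : List (List Bool)) (N : Nat) (co : List Int × List Int)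
    (Hc : ∀ j : Nat, j < N → co.1.getD j 0 = ((truesFrom matrix j 0).length : Int))
    (Ho : ∀ j : Nat, j < N → co.2.getD j 0 = ((truesFrom matrix j 0).getLast?).getD 0) :
    ∀ (m : Nat), m ≤ N →
      (List.range m).foldl (fun (st : List Int × List Int) (k : Nat) => pvA_col_step matrix st (k : Int)) ([], []) =
      (List.range m).foldl
        (fun (cc : List Int × List Int) (j : Nat) =>
          if co.1.getD j 0 ≤ 1 then
            (cc.1 ++ [(j : Int)], if co.1.getD j 0 = 1 then cc.2 ++ [co.2.getD j 0] else cc.2)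
          else cc) ([], []) := by
  intro m
  induction m with
  | zero => intro _; rfl
  | succ m ih =>
    intro hm
    rw [List.range_succ, List.foldl_append, List.foldl_append, ih (Nat.le_of_succ_le hm)]
    have hmN : m < N := hm
    have hc := Hc m hmN
    have ho := Ho m hmN
    have htr : pvA_col_step matrix
        ((List.range m).foldl
          (fun (cc : List Int × List Int) (j : Nat) =>
            if co.1.getD j 0 ≤ 1 then
              (cc.1 ++ [(j : Int)], if co.1.getD j 0 = 1 then cc.2 ++ [co.2.getD j 0] else cc.2)
            else cc) ([], [])) (m : Int) =
        (let st := (List.range m).foldl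
          (fun (cc : List Int × List Int) (j : Nat) =>
            if co.1.getD j 0 ≤ 1 then
              (cc.1 ++ [(j : Int)], if co.1.getD j 0 = 1 then cc.2 ++ [co.2.getD j 0] else cc.2)
            else cc) ([], [])
         if (truesFrom matrix m 0).length ≤ 1 then
           (st.1 ++ [(m : Int)], st.2 ++ truesFrom matrix m 0) else st) := by
      simp only [pvA_col_step, true_rows_eq matrix m 0]
    rw [List.foldl_cons, List.foldl_nil, List.foldl_cons, List.foldl_nil, htr, hc, ho]
    rcases hlen : (truesFrom matrix m 0) with _ | ⟨a, _ | ⟨b, l⟩⟩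
    · simp
    · simp
    · simp

-- ===== VERDICT (by name: the statement is the Claim_ definition above) =====
theorem filter_useless_ingredients_spec : Claim_equal_filter_useless_ingredients := by
  intro matrix _ _
  simp only [Spec_filter_useless_ingredients, filter_useless_ingredients,
    filter_useless_ingredients_alt]
  set N := ((PySem.List.pyGet? matrix 0).getD []).length
  obtain ⟨h1, h2, hjs⟩ := passGo_char N matrix 0 (List.replicate N 0, List.replicate N 0)
    (by simp) (by simp)
  have Hc : ∀ j : Nat, j < N →
      (pvB_pass N matrix).1.getD j 0 = ((truesFrom matrix j 0).length : Int) := by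
    intro j hj
    rw [pvB_pass_eq_passGo]
    have := (hjs j hj).1
    rw [this]
    simp
  have Ho : ∀ j : Nat, j < N →
      (pvB_pass N matrix).2.getD j 0 = ((truesFrom matrix j 0).getLast?).getD 0 := by
    intro j hj
    rw [pvB_pass_eq_passGo]
    have := (hjs j hj).2
    rw [this]
    simp
  have hfold : (PySem.List.pyRange 0 (N : Int) 1).foldl (pvA_col_step matrix) ([], []) =
      pvB_cull N (pvB_pass N matrix) := by
    rw [PySem.List.pyRange_zero_natCast, List.foldl_map]
    have := cull_eq matrix N (pvB_pass N matrix) Hc Ho N (le_refl N)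
    rw [this]
    rfl
  rw [hfold]
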